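-- pv_equiv track=rewrite | github.com/kentq6/ESQL | helpers/mf_struct.py | parse_having
-- ===== SOURCE A (Python) =====
-- def parse_having(having_str: str):
--     """
--     Produces list of parsed conditions in HAVING clause
--
--     Parameters
--     ----------
--     having_str : str
--         Direct input of HAVING clause
--
--     Returns
--     -------
--     res : list[list(str)]
--         Each nested list represents one condition within HAVING, with the format [param1, param2, operator]
--     """
--     res = []
--     having_conditions = having_str.split(" and ")
--     for cond in having_conditions:
--         if ">" in cond:
--             params = list(map(str.strip, cond.split(">")))
--             params.extend([">"])
--             res.append(params)
--         elif "<" in cond: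
--             params = list(map(str.strip, cond.split("<")))
--             params.extend(["<"])
--             res.append(params)
--         elif "=" in cond:
--             params = list(map(str.strip, cond.split("=")))
--             params.extend(["=="])
--             res.append(params)
--         elif "!=" in cond:
--             params = list(map(str.strip, cond.split("!=")))
--             params.extend(["!="])
--             res.append(params)
--     return res
-- ===== SOURCE B (Python) =====
-- def parse_having(having_str: str):
--     def go(remaining):
--         if not remaining:
--             return []
--         cond, rest = remaining[0], remaining[1:]
--         tail = go(rest)
--         op = min(set(cond) & set("><="), key="><=".index, default=None)
--         if op is None:
--             return tail
--         row = [p.strip() for p in cond.split(op)]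
--         row.append("==" if op == "=" else op)
--         return [row] + tail
--     return go(having_str.split(" and "))
-- ===== Notes on version B (the rewrite author's own statement) =====
-- stated objective: alternative
-- what changed: Replaces the four copy-pasted substring if/elif branches by operator detection via set-intersection of the condition's characters with the operator charset, picking the winner with min keyed by the operator's priority index, builds the rows by recursion back-to-front instead of a loop with append, and drops the dead not-equal branch (the equals branch always fires first).
import Mathlib
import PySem

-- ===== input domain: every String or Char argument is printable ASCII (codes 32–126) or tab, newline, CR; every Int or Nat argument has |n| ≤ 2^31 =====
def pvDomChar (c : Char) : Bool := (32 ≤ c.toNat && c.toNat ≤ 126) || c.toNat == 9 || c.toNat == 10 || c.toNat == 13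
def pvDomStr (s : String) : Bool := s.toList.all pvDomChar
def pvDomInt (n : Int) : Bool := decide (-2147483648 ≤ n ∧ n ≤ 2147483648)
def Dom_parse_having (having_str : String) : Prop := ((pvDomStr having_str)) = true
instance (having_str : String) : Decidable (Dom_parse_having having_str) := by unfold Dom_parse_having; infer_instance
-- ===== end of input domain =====

-- B detects the operator via set-intersection of the condition's chars with "><=" plus min by priority index,
-- and builds the rows recursively back-to-front; same values everywhere (objective: alternative).

-- cond.split(sep) for a non-empty literal sep: split? is some there, so getD is exact
def pvSplit (s sep : String) : List String := (PySem.Str.split? s sep).getD []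

-- ===== PORT A =====
def parse_having (having_str : String) : List (List String) :=
  (pvSplit having_str " and ").foldl (fun res cond =>
    if PySem.Str.isIn ">" cond then
      res ++ [((pvSplit cond ">").map PySem.Str.strip) ++ [">"]]
    else if PySem.Str.isIn "<" cond then
      res ++ [((pvSplit cond "<").map PySem.Str.strip) ++ ["<"]]
    else if PySem.Str.isIn "=" cond then
      res ++ [((pvSplit cond "=").map PySem.Str.strip) ++ ["=="]]
    else if PySem.Str.isIn "!=" cond then
      res ++ [((pvSplit cond "!=").map PySem.Str.strip) ++ ["!="]]
    else res) []

-- ===== PORT B =====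
-- "><=".index(c) for the chars that can occur in the intersection
def pvKey (c : Char) : Int := PySem.Chars.find "><=".toList [c]

def parse_having_go (remaining : List String) : List (List String) :=
  match remaining with
  | [] => []
  | cond :: rest =>
    let tail := parse_having_go rest
    -- min(set(cond) & set("><="), key="><=".index, default=None)
    match PySem.List.min? (PySem.Set.inter (PySem.Set.ofList cond.toList) (PySem.Set.ofList "><=".toList)) pvKey with
    | none => tail
    | some op =>
      (((pvSplit cond (String.ofList [op])).map PySem.Str.strip)
        ++ [if op = '=' then "==" else String.ofList [op]]) :: tail

def parse_having_alt (having_str : String) : List (List String) :=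
  parse_having_go (pvSplit having_str " and ")

-- ===== PRECONDITION & SPEC =====
def Spec_parse_having (having_str : String) (out : List (List String)) : Prop := out = parse_having_alt having_str
instance (having_str : String) (out : List (List String)) : Decidable (Spec_parse_having having_str out) := by unfold Spec_parse_having; infer_instance

-- ===== CLAIM =====
def Claim_equal_parse_having : Prop := ∀ (having_str : String), Dom_parse_having having_str → Spec_parse_having having_str (parse_having having_str)

-- ===== LEMMAS AND PROOFS =====

-- single-char 'in': isIn [c] l ↔ c ∈ l
theorem pv_isIn_singleton (c : Char) (l : List Char) :
    PySem.Chars.isIn [c] l = true ↔ c ∈ l := by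
  rw [PySem.Chars.isIn_iff_infix]
  constructor
  · intro h; exact h.mem (by simp)
  · intro h
    obtain ⟨t₁, t₂, rfl⟩ := List.mem_iff_append.mp h
    exact ⟨t₁, t₂, by simp⟩

-- membership in the intersection set
theorem pv_mem_hits (cond : String) (c : Char) :
    c ∈ PySem.Set.inter (PySem.Set.ofList cond.toList) (PySem.Set.ofList "><=".toList) ↔
      c ∈ cond.toList ∧ c ∈ ['>', '<', '='] := by
  unfold PySem.Set.inter
  simp [List.mem_filter, PySem.Set.mem_ofList]

-- the min-by-priority over any list of operator chars is the priority pick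
theorem pv_min_pick (l : List Char) (hsub : ∀ c ∈ l, c ∈ ['>', '<', '=']) :
    PySem.List.min? l pvKey =
      (if '>' ∈ l then some '>' else if '<' ∈ l then some '<' else if '=' ∈ l then some '=' else none) := by
  rcases Option.eq_none_or_eq_some (PySem.List.min? l pvKey) with h | ⟨m, h⟩
  · have hl : l = [] := (PySem.List.min?_eq_none_iff l pvKey).mp h
    subst hl; rw [h]; simp
  · have hmem := PySem.List.min?_mem h
    have hmin := PySem.List.min?_isMin h
    have hml := hsub m hmem
    simp only [List.mem_cons, List.not_mem_nil, or_false] at hml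
    rw [h]
    by_cases hg : '>' ∈ l
    · have hle := hmin '>' hg
      have hm : m = '>' := by
        rcases hml with rfl | rfl | rfl
        · rfl
        · exact absurd hle (by decide)
        · exact absurd hle (by decide)
      simp [hg, hm]
    · by_cases hl' : '<' ∈ l
      · have hle := hmin '<' hl'
        have hm : m = '<' := by
          rcases hml with rfl | rfl | rfl
          · exact absurd hmem hg
          · rfl
          · exact absurd hle (by decide)
        simp [hg, hl', hm]
      · have hm : m = '=' := by
          rcases hml with rfl | rfl | rfl
          · exact absurd hmem hg
          · exact absurd hmem hl'
          · rfl
        have he : '=' ∈ l := hm ▸ hmem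
        simp [hg, hl', he, hm]

-- "!=" in cond implies "=" in cond (A's fourth branch is unreachable)
theorem pv_neq_imp_eq (l : List Char) (h : PySem.Chars.isIn ['!', '='] l = true) : '=' ∈ l :=
  (List.IsInfix.trans (by decide : ['='] <:+: ['!', '=']) ((PySem.Chars.isIn_iff_infix _ _).mp h)).mem (by simp)

-- A's loop body = none/some row according to B's operator pick
theorem pv_body_eq (res : List (List String)) (cond : String) :
    (if PySem.Str.isIn ">" cond then
      res ++ [((pvSplit cond ">").map PySem.Str.strip) ++ [">"]]
    else if PySem.Str.isIn "<" cond then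
      res ++ [((pvSplit cond "<").map PySem.Str.strip) ++ ["<"]]
    else if PySem.Str.isIn "=" cond then
      res ++ [((pvSplit cond "=").map PySem.Str.strip) ++ ["=="]]
    else if PySem.Str.isIn "!=" cond then
      res ++ [((pvSplit cond "!=").map PySem.Str.strip) ++ ["!="]]
    else res)
    = (match PySem.List.min? (PySem.Set.inter (PySem.Set.ofList cond.toList) (PySem.Set.ofList "><=".toList)) pvKey with
       | none => res
       | some op =>
         res ++ [((pvSplit cond (String.ofList [op])).map PySem.Str.strip)
           ++ [if op = '=' then "==" else String.ofList [op]]]) := by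
  have hpick := pv_min_pick (PySem.Set.inter (PySem.Set.ofList cond.toList) (PySem.Set.ofList "><=".toList))
    (fun c hc => ((pv_mem_hits cond c).mp hc).2)
  have hg : ('>' ∈ PySem.Set.inter (PySem.Set.ofList cond.toList) (PySem.Set.ofList "><=".toList)) ↔ '>' ∈ cond.toList := by
    rw [pv_mem_hits]; simp
  have hl : ('<' ∈ PySem.Set.inter (PySem.Set.ofList cond.toList) (PySem.Set.ofList "><=".toList)) ↔ '<' ∈ cond.toList := by
    rw [pv_mem_hits]; simp
  have he : ('=' ∈ PySem.Set.inter (PySem.Set.ofList cond.toList) (PySem.Set.ofList "><=".toList)) ↔ '=' ∈ cond.toList := by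
    rw [pv_mem_hits]; simp
  rw [hpick]
  by_cases cg : '>' ∈ cond.toList
  · have g1 : PySem.Chars.isIn ['>'] cond.toList = true := (pv_isIn_singleton '>' cond.toList).mpr cg
    simp [hg, cg, g1]
  · have g1 : PySem.Chars.isIn ['>'] cond.toList = false := by
      cases hb : PySem.Chars.isIn ['>'] cond.toList
      · rfl
      · exact absurd ((pv_isIn_singleton '>' cond.toList).mp hb) cg
    by_cases cl : '<' ∈ cond.toList
    · have g2 : PySem.Chars.isIn ['<'] cond.toList = true := (pv_isIn_singleton '<' cond.toList).mpr cl
      simp [hg, cg, hl, cl, g1, g2]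
    · have g2 : PySem.Chars.isIn ['<'] cond.toList = false := by
        cases hb : PySem.Chars.isIn ['<'] cond.toList
        · rfl
        · exact absurd ((pv_isIn_singleton '<' cond.toList).mp hb) cl
      by_cases ce : '=' ∈ cond.toList
      · have g3 : PySem.Chars.isIn ['='] cond.toList = true := (pv_isIn_singleton '=' cond.toList).mpr ce
        simp [hg, cg, hl, cl, he, ce, g1, g2, g3]
      · have g3 : PySem.Chars.isIn ['='] cond.toList = false := by
          cases hb : PySem.Chars.isIn ['='] cond.toList
          · rfl
          · exact absurd ((pv_isIn_singleton '=' cond.toList).mp hb) ce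
        have hne : PySem.Chars.isIn ['!', '='] cond.toList = false := by
          cases hb : PySem.Chars.isIn ['!', '='] cond.toList
          · rfl
          · exact absurd (pv_neq_imp_eq cond.toList hb) ce
        simp [hg, cg, hl, cl, he, ce, g1, g2, g3, hne]

-- A's foldl from any accumulator = accumulator ++ B's recursion
theorem pv_fold_eq (conds : List String) (acc : List (List String)) :
    conds.foldl (fun res cond =>
      if PySem.Str.isIn ">" cond then
        res ++ [((pvSplit cond ">").map PySem.Str.strip) ++ [">"]]
      else if PySem.Str.isIn "<" cond then
        res ++ [((pvSplit cond "<").map PySem.Str.strip) ++ ["<"]]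
      else if PySem.Str.isIn "=" cond then
        res ++ [((pvSplit cond "=").map PySem.Str.strip) ++ ["=="]]
      else if PySem.Str.isIn "!=" cond then
        res ++ [((pvSplit cond "!=").map PySem.Str.strip) ++ ["!="]]
      else res) acc
    = acc ++ parse_having_go conds := by
  induction conds generalizing acc with
  | nil => simp [parse_having_go]
  | cons cond rest ih =>
    simp only [List.foldl_cons]
    rw [pv_body_eq acc cond, ih]
    conv_rhs => rw [parse_having_go]
    cases h : PySem.List.min? (PySem.Set.inter (PySem.Set.ofList cond.toList) (PySem.Set.ofList "><=".toList)) pvKey with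
    | none => rfl
    | some op => simp

-- ===== VERDICT =====
theorem parse_having_spec : Claim_equal_parse_having := by
  intro s _
  unfold Spec_parse_having parse_having parse_having_alt
  simpa using pv_fold_eq (pvSplit s " and ") []
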